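-- pv_equiv track=rewrite | github.com/elenisproject/NewsBackend | utilities.py | Predictor
-- ===== SOURCE A (Python) =====
-- def Predictor(my_input,all_categories):
--     max = 0
--     final_category = ' '
--     input_to_tokens = set(my_input)
--     for category in all_categories:
--         sum = 0
--         for i in input_to_tokens:
--             if i in all_categories[category]:
--                 sum += all_categories[category][i]
--         if max < sum :
--             max = sum
--             final_category = category
--
--     return (final_category)
-- ===== SOURCE B (Python) =====
-- def Predictor(my_input, all_categories):
--     # Inverted index: token -> list of (category, weight) pairs.
--     index = {}
--     for category, tokens in all_categories.items():
--         for tok, w in tokens.items():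
--             index.setdefault(tok, []).append((category, w))
--     scores = {cat: 0 for cat in all_categories}
--     for ch in set(my_input):
--         for cat, w in index.get(ch, []):
--             scores[cat] += w
--     max_score = 0
--     final_category = ' '
--     for cat in all_categories:
--         if max_score < scores[cat]:
--             max_score = scores[cat]
--             final_category = cat
--     return final_category
-- ===== Notes on version B (the rewrite author's own statement) =====
-- stated objective: alternative
-- what changed: B replaces A's nested per-category rescan (which re-looks-up all_categories[category] for every input token) with a one-pass inverted token->(category,weight) index plus a score table updated per distinct input token, followed by the same strict-'<' selection pass.
import Mathlib
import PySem

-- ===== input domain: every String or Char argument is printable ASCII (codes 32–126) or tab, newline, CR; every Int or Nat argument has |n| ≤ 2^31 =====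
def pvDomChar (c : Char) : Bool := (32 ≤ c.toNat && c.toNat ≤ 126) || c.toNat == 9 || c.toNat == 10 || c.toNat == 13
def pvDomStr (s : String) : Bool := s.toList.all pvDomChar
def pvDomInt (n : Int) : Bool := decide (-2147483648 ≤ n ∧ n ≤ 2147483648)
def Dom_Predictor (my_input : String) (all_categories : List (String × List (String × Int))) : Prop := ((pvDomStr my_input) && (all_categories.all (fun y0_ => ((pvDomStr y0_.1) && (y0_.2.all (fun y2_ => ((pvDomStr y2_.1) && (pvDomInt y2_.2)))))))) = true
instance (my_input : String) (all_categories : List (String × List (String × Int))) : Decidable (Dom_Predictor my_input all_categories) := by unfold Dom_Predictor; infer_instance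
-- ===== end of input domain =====

-- B restructures A: it builds an inverted token → (category, weight) index and a score table,
-- then runs the same strict-'<' selection pass, instead of scanning each category's dict per input
-- token; return values proved equal on dict inputs (distinct keys at both levels).

-- ===== PORT A =====
def Predictor (my_input : String) (all_categories : List (String × List (String × Int))) : String :=
  let input_to_tokens : PySem.Set Char := PySem.Set.ofList my_input.toList
  let st := all_categories.foldl (fun (st : Int × String) entry =>
      -- all_categories[category]: the key comes from the iteration itself, so it is present and getD is exact
      let d : PySem.Dict String Int :=
        PySem.Dict.mk ((PySem.Dict.mk all_categories).getD entry.1 [])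
      -- the set is consumed by a commutative sum, so its iteration order cannot affect the result
      let s : Int := input_to_tokens.foldl (fun s c =>
        if d.contains (String.ofList [c]) then s + d.getD (String.ofList [c]) 0 else s) 0
      if st.1 < s then (s, entry.1) else st) (0, " ")
  st.2

-- ===== PORT B =====
def Predictor_alt (my_input : String) (all_categories : List (String × List (String × Int))) : String :=
  let index : PySem.Dict String (List (String × Int)) :=
    all_categories.foldl (fun idx entry =>
      entry.2.foldl (fun idx tw =>
        idx.modify tw.1 [] (· ++ [(entry.1, tw.2)])) idx) PySem.Dict.empty
  let scores0 : PySem.Dict String Int :=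
    all_categories.foldl (fun d entry => d.insert entry.1 0) PySem.Dict.empty
  -- the set is consumed by per-key commutative additions into scores, which is only looked up
  -- afterwards, so its iteration order cannot affect the result
  let scores : PySem.Dict String Int :=
    (PySem.Set.ofList my_input.toList).foldl (fun sc c =>
      (index.getD (String.ofList [c]) []).foldl (fun sc cw =>
        sc.modify cw.1 0 (· + cw.2)) sc) scores0
  let st := all_categories.foldl (fun (st : Int × String) entry =>
      let s := scores.getD entry.1 0
      if st.1 < s then (s, entry.1) else st) (0, " ")
  st.2

-- ===== PRECONDITION & SPEC =====
-- Pre_ requires distinct keys at both levels: all_categories is a Python dict of dicts, which can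
-- never contain duplicate keys, so association lists with repeated keys represent no Python input.
def Pre_Predictor (my_input : String) (all_categories : List (String × List (String × Int))) : Prop :=
  (all_categories.map Prod.fst).Nodup ∧ ∀ e ∈ all_categories, (e.2.map Prod.fst).Nodup
instance (my_input : String) (all_categories : List (String × List (String × Int))) : Decidable (Pre_Predictor my_input all_categories) := by unfold Pre_Predictor; infer_instance
def pvWitness_Predictor : String × (List (String × List (String × Int))) :=
  ("ab", [("x", [("a", 2)]), ("y", [("b", 3)])])
def Spec_Predictor (my_input : String) (all_categories : List (String × List (String × Int))) (out : String) : Prop := out = Predictor_alt my_input all_categories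
instance (my_input : String) (all_categories : List (String × List (String × Int))) (out : String) : Decidable (Spec_Predictor my_input all_categories out) := by unfold Spec_Predictor; infer_instance

-- ===== CLAIM (what is proved, stated in full; the proofs are below) =====
def Claim_equal_Predictor : Prop := ∀ (my_input : String) (all_categories : List (String × List (String × Int))), Dom_Predictor my_input all_categories → Pre_Predictor my_input all_categories → Spec_Predictor my_input all_categories (Predictor my_input all_categories)

-- ===== LEMMAS AND PROOFS =====

-- total weight that key t contributes in the association list d (sum over entries keyed t)
def pvWgt (d : List (String × Int)) (t : String) : Int :=
  ((d.filter (fun tw => tw.1 == t)).map (·.2)).sum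

-- specification of B's inverted index at token t
def pvIdxSpec (acs : List (String × List (String × Int))) (t : String) : List (String × Int) :=
  acs.flatMap (fun e => (e.2.filter (fun tw => tw.1 == t)).map (fun tw => (e.1, tw.2)))

lemma pv_addFold_getD (l : List (String × Int)) (sc : PySem.Dict String Int) (k : String) :
    (l.foldl (fun sc cw => sc.modify cw.1 0 (· + cw.2)) sc).getD k 0
      = sc.getD k 0 + pvWgt l k := by
  induction l generalizing sc with
  | nil => simp [pvWgt]
  | cons cw rest ih =>
    simp only [List.foldl_cons]
    rw [ih, PySem.Dict.getD_modify]
    by_cases h : cw.1 = k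
    · simp [pvWgt, h]; ring
    · have h' : ¬ k = cw.1 := fun e => h e.symm
      simp [pvWgt, h, h']

lemma pv_lookup_eq_get? (d : PySem.Dict String Int) (t : String) :
    (if d.contains t then d.getD t 0 else 0) = (d.get? t).getD 0 := by
  rw [PySem.Dict.contains_eq_isSome_get?, PySem.Dict.getD_eq_get?_getD]
  cases d.get? t <;> simp

lemma pv_wgt_eq_get? (d : List (String × Int)) (t : String) (h : (d.map Prod.fst).Nodup) :
    pvWgt d t = ((PySem.Dict.mk d).get? t).getD 0 := by
  induction d with
  | nil => simp [pvWgt, PySem.Dict.get?]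
  | cons p rest ih =>
    obtain ⟨k0, v0⟩ := p
    simp only [List.map_cons, List.nodup_cons] at h
    rw [PySem.Dict.get?_mk_cons]
    by_cases hp : k0 = t
    · have hrest : rest.filter (fun tw => tw.1 == t) = [] := by
        rw [List.filter_eq_nil_iff]; intro a ha hb
        exact h.1 (by rw [hp, ← (by simpa using hb : a.1 = t)]; exact List.mem_map_of_mem ha)
      simp [pvWgt, hp, hrest]
    · have hb : ¬ (k0 == t) = true := by simpa using hp
      have h1 : pvWgt ((k0, v0) :: rest) t = pvWgt rest t := by
        simp [pvWgt, hb]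
      rw [h1, ih h.2]
      simp [hb]

lemma pv_sum_filter_idxSpec (acs : List (String × List (String × Int))) (t cat : String) :
    pvWgt (pvIdxSpec acs t) cat
      = (acs.map (fun e => if e.1 = cat then pvWgt e.2 t else 0)).sum := by
  induction acs with
  | nil => simp [pvWgt, pvIdxSpec]
  | cons e rest ih =>
    have hcons : pvIdxSpec (e :: rest) t
        = (e.2.filter (fun tw => tw.1 == t)).map (fun tw => (e.1, tw.2)) ++ pvIdxSpec rest t := by
      simp [pvIdxSpec]
    rw [List.map_cons, List.sum_cons, ← ih]
    simp only [pvWgt, hcons, List.filter_append, List.map_append, List.sum_append]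
    congr 1
    by_cases hc : e.1 = cat
    · simp [List.filter_map, Function.comp_def, hc]
    · have hb : (e.1 == cat) = false := by simpa using hc
      simp [List.filter_map, Function.comp_def, hb]
      exact fun h => absurd h hc

lemma pv_sum_if_nodup (acs : List (String × List (String × Int))) (cat : String)
    (dcat : List (String × Int)) (hmem : (cat, dcat) ∈ acs)
    (hnd : (acs.map Prod.fst).Nodup) (f : List (String × Int) → Int) :
    (acs.map (fun e => if e.1 = cat then f e.2 else 0)).sum = f dcat := by
  induction acs with
  | nil => simp at hmem
  | cons e rest ih =>
    simp only [List.map_cons, List.nodup_cons] at hnd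
    rcases List.mem_cons.mp hmem with he | hrest
    · have hz : ∀ e' ∈ rest, (if e'.1 = cat then f e'.2 else 0) = 0 := by
        intro e' he'
        have : e'.1 ≠ cat := by
          intro hc
          apply hnd.1
          have hm : e'.1 ∈ rest.map Prod.fst := List.mem_map_of_mem he'
          rw [← he]
          exact hc ▸ hm
        simp [this]
      rw [List.map_cons, List.sum_cons, ← he]
      have : (rest.map (fun e => if e.1 = cat then f e.2 else 0)).sum = 0 := by
        apply List.sum_eq_zero; intro x hx
        rcases List.mem_map.mp hx with ⟨e', he', rfl⟩; exact hz e' he'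
      simp [this]
    · have hne : e.1 ≠ cat := by
        intro hc
        exact hnd.1 (hc ▸ (List.mem_map_of_mem hrest : (cat, dcat).1 ∈ rest.map Prod.fst))
      rw [List.map_cons, List.sum_cons, if_neg hne, ih hrest hnd.2]
      simp

lemma pv_idx_getD (acs : List (String × List (String × Int)))
    (d : PySem.Dict String (List (String × Int))) (t : String) :
    (acs.foldl (fun idx e => e.2.foldl (fun idx tw =>
        idx.modify tw.1 [] (· ++ [(e.1, tw.2)])) idx) d).getD t []
      = d.getD t [] ++ pvIdxSpec acs t := by
  induction acs generalizing d with
  | nil => simp [pvIdxSpec]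
  | cons e rest ih =>
    simp only [List.foldl_cons]
    rw [ih]
    have h1 : e.2.foldl (fun idx tw => idx.modify tw.1 [] (· ++ [(e.1, tw.2)])) d
        = (e.2.map (fun tw => (tw.1, (e.1, tw.2)))).foldl
            (fun d p => d.modify p.1 [] (· ++ [p.2])) d := by
      rw [List.foldl_map]
    rw [h1, PySem.Dict.getD_foldl_modify_append]
    simp [pvIdxSpec, List.filter_map, List.map_map, Function.comp_def]

lemma pv_scores0_getD (acs : List (String × List (String × Int)))
    (d : PySem.Dict String Int) (k : String) (h : d.getD k 0 = 0) :
    (acs.foldl (fun d e => d.insert e.1 0) d).getD k 0 = 0 := by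
  induction acs generalizing d with
  | nil => simpa using h
  | cons e rest ih =>
    simp only [List.foldl_cons]
    exact ih _ (by rw [PySem.Dict.getD_insert]; split <;> simp [h])

lemma pv_scores_getD (toks : List Char) (I : String → List (String × Int))
    (sc : PySem.Dict String Int) (k : String) :
    (toks.foldl (fun sc c => (I (String.ofList [c])).foldl
        (fun sc cw => sc.modify cw.1 0 (· + cw.2)) sc) sc).getD k 0
      = sc.getD k 0 + (toks.map (fun c => pvWgt (I (String.ofList [c])) k)).sum := by
  induction toks generalizing sc with
  | nil => simp
  | cons c rest ih =>
    simp only [List.foldl_cons, List.map_cons, List.sum_cons]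
    rw [ih, pv_addFold_getD]; ring

lemma pv_Asum (toks : List Char) (d : PySem.Dict String Int) :
    toks.foldl (fun s c =>
        if d.contains (String.ofList [c]) then s + d.getD (String.ofList [c]) 0 else s) 0
      = (toks.map (fun c => (d.get? (String.ofList [c])).getD 0)).sum := by
  have h : ∀ (s : Int), ∀ c ∈ toks,
      (if d.contains (String.ofList [c]) then s + d.getD (String.ofList [c]) 0 else s)
        = s + (d.get? (String.ofList [c])).getD 0 := by
    intro s c _
    rw [← pv_lookup_eq_get?]
    split <;> simp
  rw [PySem.List.foldl_congr_mem _ _ _ _ h, PySem.List.foldl_add]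
  simp

lemma pv_main (my_input : String) (acs : List (String × List (String × Int)))
    (hnd : (acs.map Prod.fst).Nodup) (hinner : ∀ e ∈ acs, (e.2.map Prod.fst).Nodup) :
    Predictor my_input acs = Predictor_alt my_input acs := by
  unfold Predictor Predictor_alt
  have hkeys : (PySem.Dict.mk acs).keys.Nodup := by
    simpa [PySem.Dict.keys] using hnd
  apply congrArg Prod.snd
  apply PySem.List.foldl_congr_mem
  intro st e he
  dsimp only
  have hlook : (PySem.Dict.mk acs).getD e.1 [] = e.2 :=
    PySem.Dict.getD_of_mem_items (PySem.Dict.mk acs) (by simpa using he) hkeys []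
  rw [hlook]
  have hsA : (PySem.Set.ofList my_input.toList).foldl (fun s c =>
      if (PySem.Dict.mk e.2).contains (String.ofList [c]) then
        s + (PySem.Dict.mk e.2).getD (String.ofList [c]) 0 else s) 0
      = ((PySem.Set.ofList my_input.toList).map (fun c => pvWgt e.2 (String.ofList [c]))).sum := by
    rw [pv_Asum]
    congr 1
    apply List.map_congr_left
    intro c _
    exact (pv_wgt_eq_get? _ _ (hinner e he)).symm
  have hsB : ((PySem.Set.ofList my_input.toList).foldl (fun sc c =>
      ((acs.foldl (fun idx entry => entry.2.foldl (fun idx tw =>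
          idx.modify tw.1 [] (· ++ [(entry.1, tw.2)])) idx) PySem.Dict.empty).getD
            (String.ofList [c]) []).foldl (fun sc cw => sc.modify cw.1 0 (· + cw.2)) sc)
      (acs.foldl (fun d entry => d.insert entry.1 0) PySem.Dict.empty)).getD e.1 0
      = ((PySem.Set.ofList my_input.toList).map (fun c => pvWgt e.2 (String.ofList [c]))).sum := by
    rw [pv_scores_getD _ (fun t => (acs.foldl (fun idx entry => entry.2.foldl (fun idx tw =>
          idx.modify tw.1 [] (· ++ [(entry.1, tw.2)])) idx) PySem.Dict.empty).getD t [])]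
    rw [pv_scores0_getD _ _ _ (by simp)]
    simp only [zero_add]
    congr 1
    apply List.map_congr_left
    intro c _
    rw [pv_idx_getD]
    simp only [PySem.Dict.getD_empty, List.nil_append]
    rw [pv_sum_filter_idxSpec]
    exact pv_sum_if_nodup acs e.1 e.2 (by simpa using he) hnd (fun d => pvWgt d (String.ofList [c]))
  rw [hsA, hsB]

-- ===== VERDICT (by name: the statement is the Claim_ definition above) =====
theorem Predictor_spec : Claim_equal_Predictor := by
  intro my_input acs _ hpre
  exact pv_main my_input acs hpre.1 hpre.2
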